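-- pv_equiv track=rewrite | github.com/prabhavk/embh | tools/generate_header.py | _remove_function_bodies
-- ===== SOURCE A (Python) =====
-- def _remove_function_bodies(class_body: str) -> str:
--     """Remove function bodies, keeping only declarations."""
--     # This function replaces inline function definitions with just declarations
--     result = []
--     lines = class_body.split('\n')
--     i = 0
--
--     while i < len(lines):
--         line = lines[i].strip()
--
--         # Check if this line starts a function definition (has opening brace)
--         if '{' in line and not line.startswith('class'):
--             # Find the function signature part before the brace
--             sig_end = line.find('{')
--             signature = line[:sig_end].strip()
--
--             # If it's a function declaration, replace with semicolon
--             if '(' in signature and ')' in signature: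
--                 result.append(signature + ';')
--
--                 # Skip lines until we find the matching closing brace
--                 brace_count = line.count('{') - line.count('}')
--                 i += 1
--                 while i < len(lines) and brace_count > 0:
--                     brace_count += lines[i].count('{') - lines[i].count('}')
--                     i += 1
--                 continue
--
--         result.append(lines[i])
--         i += 1
--
--     return '\n'.join(result)
-- ===== SOURCE B (Python) =====
-- def _remove_function_bodies(class_body: str) -> str:
--     """Remove function bodies, keeping only declarations."""
--     # Two staged passes: pass 1 builds a table of (start, end, signature)
--     # intervals for each recognized function body; pass 2 assembles the output
--     # by slicing the original lines around those intervals.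
--     lines = class_body.split('\n')
--     n = len(lines)
--     bodies = []  # interval table: (start, end, signature)
--     i = 0
--     while i < n:
--         line = lines[i].strip()
--         sig = line[:line.find('{')].strip() if '{' in line else ''
--         if '{' in line and not line.startswith('class') and '(' in sig and ')' in sig:
--             depth = 0
--             j = i
--             while j < n:
--                 depth += lines[j].count('{') - lines[j].count('}')
--                 j += 1
--                 if depth <= 0:
--                     break
--             bodies.append((i, j, sig))
--             i = j
--         else:
--             i += 1
--     out = []
--     pos = 0
--     for start, end, sig in bodies:
--         out.extend(lines[pos:start])
--         out.append(sig + ';')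
--         pos = end
--     out.extend(lines[pos:])
--     return '\n'.join(out)
-- ===== Notes on version B (the rewrite author's own statement) =====
-- stated objective: alternative
-- what changed: B splits the work into two staged passes: pass 1 scans the lines once to build an interval table of (start, end, signature) for every recognized function body, pass 2 assembles the output by slicing the original lines around those intervals and appending a semicolon-terminated declaration for each, instead of A's interleaved emit-and-skip single loop.
import Mathlib
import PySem

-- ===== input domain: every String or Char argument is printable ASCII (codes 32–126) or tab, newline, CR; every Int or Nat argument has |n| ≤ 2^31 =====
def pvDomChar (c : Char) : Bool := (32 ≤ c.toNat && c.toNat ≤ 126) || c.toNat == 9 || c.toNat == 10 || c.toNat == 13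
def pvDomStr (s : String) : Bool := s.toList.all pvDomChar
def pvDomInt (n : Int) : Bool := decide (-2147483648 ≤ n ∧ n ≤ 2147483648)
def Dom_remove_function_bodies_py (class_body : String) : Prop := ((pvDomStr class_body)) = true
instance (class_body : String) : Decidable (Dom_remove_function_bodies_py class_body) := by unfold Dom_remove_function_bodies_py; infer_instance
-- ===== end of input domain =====

-- B replaces A's interleaved emit-and-skip loop by two staged passes: pass 1 builds an
-- interval table (start, end, signature) of the recognized function bodies, pass 2
-- assembles the output by slicing around those intervals (objective: alternative).

-- ===== PORT A =====

-- line.count('{') - line.count('}')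
def pvDelta (l : List Char) : Int :=
  (PySem.Chars.count l ['{'] : Int) - (PySem.Chars.count l ['}'] : Int)

-- A's inner while: 'while i < len(lines) and brace_count > 0: brace_count += …; i += 1'
def pvSkipA (bc : Int) : List (List Char) → List (List Char)
  | [] => []
  | x :: xs => if bc > 0 then pvSkipA (bc + pvDelta x) xs else x :: xs

theorem pvSkipA_length_le (bc : Int) (xs : List (List Char)) :
    (pvSkipA bc xs).length ≤ xs.length := by
  induction xs generalizing bc with
  | nil => simp [pvSkipA]
  | cons x xs ih =>
    simp only [pvSkipA]
    split
    · exact Nat.le_succ_of_le (ih _)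
    · exact Nat.le_refl _

-- A's outer while loop over the lines
def pvGoA : List (List Char) → List (List Char)
  | [] => []
  | l :: rest =>
    let line := PySem.Chars.strip l
    if PySem.Chars.isIn ['{'] line && !(PySem.Chars.startswith line "class".toList) then
      let sigEnd := PySem.Chars.find line ['{']
      let signature := PySem.Chars.strip (PySem.Chars.slice line none (some sigEnd))
      if PySem.Chars.isIn ['('] signature && PySem.Chars.isIn [')'] signature then
        (signature ++ [';']) :: pvGoA (pvSkipA (pvDelta line) rest)
      else l :: pvGoA rest
    else l :: pvGoA rest
  termination_by xs => xs.length
  decreasing_by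
  · exact Nat.lt_succ_of_le (pvSkipA_length_le _ _)
  · exact Nat.lt_succ_self _
  · exact Nat.lt_succ_self _

def remove_function_bodies_py (class_body : String) : String :=
  String.ofList (PySem.Chars.join ['\n'] (pvGoA (PySem.Chars.splitOn class_body.toList ['\n'])))

-- ===== PORT B =====

-- B's inner while of pass 1: 'while j < n: depth += …; j += 1; if depth <= 0: break'
-- (lines.getD j [] is Python's lines[j]: j < n holds at each use)
def pvFindEnd (lines : List (List Char)) (n : Nat) (depth : Int) (j : Nat) : Nat :=
  if _h : j < n then
    if depth + pvDelta (lines.getD j []) ≤ 0 then j + 1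
    else pvFindEnd lines n (depth + pvDelta (lines.getD j [])) (j + 1)
  else j
  termination_by n - j

theorem pvFindEnd_ge (lines : List (List Char)) (n : Nat) (depth : Int) (j : Nat) :
    j ≤ pvFindEnd lines n depth j := by
  unfold pvFindEnd
  split
  · split
    · omega
    · have := pvFindEnd_ge lines n (depth + pvDelta (lines.getD j [])) (j + 1)
      omega
  · exact Nat.le_refl _
  termination_by n - j

theorem pvFindEnd_gt (lines : List (List Char)) (n : Nat) (depth : Int) (j : Nat)
    (h : j < n) : j < pvFindEnd lines n depth j := by
  unfold pvFindEnd
  rw [dif_pos h]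
  split
  · omega
  · have := pvFindEnd_ge lines n (depth + pvDelta (lines.getD j [])) (j + 1)
    omega

-- B's pass 1: the interval table of recognized function bodies
def pvPass1 (lines : List (List Char)) (n : Nat) (i : Nat) : List (Nat × Nat × List Char) :=
  if h : i < n then
    let line := PySem.Chars.strip (lines.getD i [])
    let sig := if PySem.Chars.isIn ['{'] line then
        PySem.Chars.strip (PySem.Chars.slice line none (some (PySem.Chars.find line ['{'])))
      else []
    if PySem.Chars.isIn ['{'] line && !(PySem.Chars.startswith line "class".toList)
        && PySem.Chars.isIn ['('] sig && PySem.Chars.isIn [')'] sig then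
      (i, pvFindEnd lines n 0 i, sig) :: pvPass1 lines n (pvFindEnd lines n 0 i)
    else pvPass1 lines n (i + 1)
  else []
  termination_by n - i
  decreasing_by
  · have := pvFindEnd_gt lines n 0 i h; omega
  · omega

-- B's pass 2: assemble the output around the intervals
def pvPass2 (lines : List (List Char)) : List (Nat × Nat × List Char) → Nat → List (List Char)
  | [], pos => PySem.List.slice lines (some (pos : Int)) none
  | (s, e, sig) :: bs, pos =>
      PySem.List.slice lines (some (pos : Int)) (some (s : Int)) ++
        ((sig ++ [';']) :: pvPass2 lines bs e)

def remove_function_bodies_py_alt (class_body : String) : String :=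
  let lines := PySem.Chars.splitOn class_body.toList ['\n']
  String.ofList (PySem.Chars.join ['\n'] (pvPass2 lines (pvPass1 lines lines.length 0) 0))

-- ===== PRECONDITION & SPEC =====
def Spec_remove_function_bodies_py (class_body : String) (out : String) : Prop := out = remove_function_bodies_py_alt class_body
instance (class_body : String) (out : String) : Decidable (Spec_remove_function_bodies_py class_body out) := by unfold Spec_remove_function_bodies_py; infer_instance

-- ===== CLAIM (what is proved, stated in full; the proofs are below) =====
def Claim_equal_remove_function_bodies_py : Prop := ∀ (class_body : String), Dom_remove_function_bodies_py class_body → Spec_remove_function_bodies_py class_body (remove_function_bodies_py class_body)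

-- ===== LEMMAS AND PROOFS =====

-- counting a single non-whitespace character is invariant under strip
theorem pvCount_go_singleton (c : Char) (fuel : Nat) (l : List Char) (acc : Nat)
    (h : l.length ≤ fuel) : PySem.Chars.count.go [c] fuel l acc = acc + l.count c := by
  induction fuel generalizing l acc with
  | zero =>
    rw [List.length_eq_zero_iff.mp (Nat.le_zero.mp h)]
    simp [PySem.Chars.count.go]
  | succ fuel ih =>
    cases l with
    | nil => simp [PySem.Chars.count.go]
    | cons x t =>
      have ht : t.length ≤ fuel := by simp [List.length_cons] at h; omega
      simp only [PySem.Chars.count.go, List.isPrefixOf, List.length, List.drop]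
      by_cases hx : c = x
      · subst hx
        simp only [beq_self_eq_true, Bool.true_and, if_true]
        rw [ih t (acc + 1) ht]
        simp
        omega
      · rw [if_neg (by simp [hx]), ih t acc ht]
        simp [Ne.symm hx]

theorem pvCount_singleton (c : Char) (l : List Char) :
    PySem.Chars.count l [c] = l.count c := by
  simp [PySem.Chars.count]
  have := pvCount_go_singleton c l.length l 0 (Nat.le_refl _)
  omega

theorem pvCount_strip (c : Char) (hc : PySem.Chars.isspace c = false) (l : List Char) :
    (PySem.Chars.strip l).count c = l.count c := by
  have key : ∀ m : List Char, (m.dropWhile PySem.Chars.isspace).count c = m.count c := by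
    intro m
    have h0 : (m.takeWhile PySem.Chars.isspace).count c = 0 :=
      List.count_eq_zero.mpr (fun hmem => by
        have := List.mem_takeWhile_imp hmem
        rw [hc] at this; exact Bool.false_ne_true this)
    conv_rhs => rw [← List.takeWhile_append_dropWhile (p := PySem.Chars.isspace) (l := m)]
    rw [List.count_append, h0, Nat.zero_add]
  simp only [PySem.Chars.strip, PySem.Chars.lstrip, PySem.Chars.rstrip]
  rw [List.count_reverse, key, List.count_reverse, key]

theorem pvDelta_strip (l : List Char) : pvDelta (PySem.Chars.strip l) = pvDelta l := by
  unfold pvDelta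
  rw [pvCount_singleton, pvCount_singleton, pvCount_singleton, pvCount_singleton,
      pvCount_strip _ (by decide), pvCount_strip _ (by decide)]

theorem pvFindEnd_le (lines : List (List Char)) (n : Nat) (depth : Int) (j : Nat)
    (h : j ≤ n) : pvFindEnd lines n depth j ≤ n := by
  unfold pvFindEnd
  split
  · split
    · omega
    · exact pvFindEnd_le lines n _ (j + 1) (by omega)
  · exact h
  termination_by n - j

theorem pvSkipA_nonpos (bc : Int) (h : ¬ bc > 0) (xs : List (List Char)) :
    pvSkipA bc xs = xs := by
  cases xs with
  | nil => rfl
  | cons x xs => simp [pvSkipA, h]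

-- A's skip loop lands exactly at the index pass 1's inner loop computes
theorem pvSkipA_eq_drop_findEnd (lines : List (List Char)) (bc : Int) (j : Nat)
    (hj : j ≤ lines.length) (hbc : bc > 0) :
    pvSkipA bc (lines.drop j) = lines.drop (pvFindEnd lines lines.length bc j) := by
  unfold pvFindEnd
  by_cases h : j < lines.length
  · rw [dif_pos h, List.drop_eq_getElem_cons h]
    have hget : lines[j] = lines.getD j [] := (List.getD_eq_getElem lines [] h).symm
    simp only [pvSkipA, if_pos hbc, hget]
    split
    · rename_i hle
      rw [pvSkipA_nonpos _ (by omega)]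
    · rename_i hgt
      exact pvSkipA_eq_drop_findEnd lines _ (j + 1) (by omega) (by omega)
  · rw [dif_neg h]
    have : lines.drop j = [] := List.drop_eq_nil_iff.mpr (by omega)
    simp [this, pvSkipA]
  termination_by lines.length - j

-- every interval of pass 1 starts at or after the scan position
theorem pvPass1_head_ge (lines : List (List Char)) (n i : Nat) :
    ∀ s e sig bs, pvPass1 lines n i = (s, e, sig) :: bs → i ≤ s := by
  intro s e sig bs h
  unfold pvPass1 at h
  simp only [] at h
  split at h
  · split at h <;> split at h
    · simp only [List.cons.injEq, Prod.mk.injEq] at h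
      exact h.1.1.le
    · have := pvPass1_head_ge lines n (i + 1) s e sig bs h
      omega
    · simp only [List.cons.injEq, Prod.mk.injEq] at h
      exact h.1.1.le
    · have := pvPass1_head_ge lines n (i + 1) s e sig bs h
      omega
  · cases h
  termination_by n - i
  decreasing_by all_goals omega

-- a kept line peels off the front of pass 2's next slice
theorem pvPass2_cons_line (lines : List (List Char)) (bs : List (Nat × Nat × List Char))
    (i : Nat) (hi : i < lines.length)
    (hge : ∀ s e sig bs', bs = (s, e, sig) :: bs' → i + 1 ≤ s) :
    pvPass2 lines bs i = lines.getD i [] :: pvPass2 lines bs (i + 1) := by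
  have hget : lines.getD i [] = lines[i] := List.getD_eq_getElem lines [] hi
  cases bs with
  | nil =>
    simp only [pvPass2, PySem.List.slice_from_natCast]
    rw [List.drop_eq_getElem_cons hi, hget]
  | cons b bs' =>
    obtain ⟨s, e, sig⟩ := b
    have hs : i + 1 ≤ s := hge s e sig bs' rfl
    simp only [pvPass2, PySem.List.slice_natCast]
    rw [List.drop_eq_getElem_cons hi, hget]
    have h1 : s - i = (s - (i + 1)) + 1 := by omega
    rw [h1, List.take_succ_cons]
    simp

-- the main correspondence: assembling pass 1's table from position i is A's loop on the suffix
theorem pvMain (lines : List (List Char)) (i : Nat) (hi : i ≤ lines.length) :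
    pvPass2 lines (pvPass1 lines lines.length i) i = pvGoA (lines.drop i) := by
  by_cases h : i < lines.length
  case neg =>
    have hd : lines.drop i = [] := List.drop_eq_nil_iff.mpr (by omega)
    rw [pvPass1, dif_neg h, hd]
    simp only [pvPass2, pvGoA, PySem.List.slice_from_natCast, hd]
  case pos =>
    have hget : lines.getD i [] = lines[i] := List.getD_eq_getElem lines [] h
    have hdrop : lines.drop i = lines[i] :: lines.drop (i + 1) := List.drop_eq_getElem_cons h
    have keep : pvPass2 lines (pvPass1 lines lines.length (i + 1)) i
        = lines[i] :: pvGoA (lines.drop (i + 1)) := by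
      rw [pvPass2_cons_line lines _ i h (pvPass1_head_ge lines lines.length (i + 1)), hget,
        pvMain lines (i + 1) (by omega)]
    rw [pvPass1, dif_pos h]
    simp only [hget]
    rw [hdrop]
    simp only [pvGoA]
    by_cases c1 : PySem.Chars.isIn ['{'] (PySem.Chars.strip lines[i]) = true
    · by_cases c2 : PySem.Chars.startswith (PySem.Chars.strip lines[i]) "class".toList = true
      · simp only [c1, c2, if_true, Bool.not_true, Bool.and_false, Bool.false_and,
          if_false, Bool.false_eq_true, keep]
      · rw [if_pos c1]
        by_cases c3 : PySem.Chars.isIn ['('] (PySem.Chars.strip (PySem.Chars.slice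
            (PySem.Chars.strip lines[i]) none
            (some (PySem.Chars.find (PySem.Chars.strip lines[i]) ['{'])))) = true
        · by_cases c4 : PySem.Chars.isIn [')'] (PySem.Chars.strip (PySem.Chars.slice
              (PySem.Chars.strip lines[i]) none
              (some (PySem.Chars.find (PySem.Chars.strip lines[i]) ['{'])))) = true
          · simp only [c1, c2, c3, c4, Bool.not_false, Bool.and_true, Bool.true_and,
              if_true, if_false]
            simp only [pvPass2, PySem.List.slice_natCast, Nat.sub_self, List.take_zero,
              List.nil_append]
            have hjle := pvFindEnd_le lines lines.length 0 i (by omega)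
            rw [pvMain lines (pvFindEnd lines lines.length 0 i) hjle]
            congr 1
            rw [pvFindEnd, dif_pos h]
            simp only [hget, Int.zero_add, pvDelta_strip]
            split
            · rename_i hle
              rw [pvSkipA_nonpos _ (by omega)]
            · rename_i hgt
              rw [← pvSkipA_eq_drop_findEnd lines _ (i + 1) (by omega) (by omega)]
          · simp only [c1, c2, c3, c4, Bool.not_false, Bool.and_true, Bool.true_and,
              Bool.and_false, Bool.false_eq_true, if_true, if_false, keep]
        · simp only [c1, c2, c3, Bool.not_false, Bool.true_and, Bool.false_and,
            Bool.and_false, Bool.false_eq_true, if_true, if_false, keep]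
    · simp only [c1, Bool.false_and, Bool.false_eq_true, if_false, keep]
  termination_by lines.length - i
  decreasing_by
  · omega
  · have := pvFindEnd_gt lines lines.length 0 i h; omega

-- ===== VERDICT (by name: the statement is the Claim_ definition above) =====
theorem remove_function_bodies_py_spec : Claim_equal_remove_function_bodies_py := by
  intro class_body _
  unfold Spec_remove_function_bodies_py remove_function_bodies_py
  simp only [remove_function_bodies_py_alt]
  rw [pvMain _ 0 (Nat.zero_le _), List.drop_zero]
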